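-- pv_equiv track=rewrite | github.com/s-maddrellmander/Advent_of_Code | solutions/year_2023/day_12.py | valid_combination
-- ===== SOURCE A (Python) =====
-- def valid_combination(combination, expected_groups):
--     # Function to check if a combination matches the expected group sizes
--     groups = []
--     count = 0
--     for c in combination:
--         if c == "#":
--             count += 1
--         elif count > 0:
--             groups.append(count)
--             count = 0
--     if count > 0:
--         groups.append(count)
--     return groups == expected_groups
-- ===== SOURCE B (Python) =====
-- def valid_combination(combination, expected_groups):
--     # Match the string against the expected groups directly, without ever
--     # building a list of run lengths: for each expected group, advance to the
--     # next run of '#' and require its length to equal the group; finally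
--     # require no '#' to remain.  Early-exits on the first mismatch.
--     n = len(combination)
--     i = 0
--     for g in expected_groups:
--         while i < n and combination[i] != "#":
--             i += 1
--         run = 0
--         while i < n and combination[i] == "#":
--             run += 1
--             i += 1
--         if run == 0 or run != g:
--             return False
--     while i < n:
--         if combination[i] == "#":
--             return False
--         i += 1
--     return True
-- ===== Notes on version B (the rewrite author's own statement) =====
-- stated objective: alternative
-- what changed: A builds the full list of '#'-run lengths and then compares it to expected_groups; B never builds a list: it consumes the string against expected_groups with a two-pointer matcher (skip to next run, measure it, compare to the current group, early-exit on mismatch) and finally checks no '#' remains.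
import Mathlib
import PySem

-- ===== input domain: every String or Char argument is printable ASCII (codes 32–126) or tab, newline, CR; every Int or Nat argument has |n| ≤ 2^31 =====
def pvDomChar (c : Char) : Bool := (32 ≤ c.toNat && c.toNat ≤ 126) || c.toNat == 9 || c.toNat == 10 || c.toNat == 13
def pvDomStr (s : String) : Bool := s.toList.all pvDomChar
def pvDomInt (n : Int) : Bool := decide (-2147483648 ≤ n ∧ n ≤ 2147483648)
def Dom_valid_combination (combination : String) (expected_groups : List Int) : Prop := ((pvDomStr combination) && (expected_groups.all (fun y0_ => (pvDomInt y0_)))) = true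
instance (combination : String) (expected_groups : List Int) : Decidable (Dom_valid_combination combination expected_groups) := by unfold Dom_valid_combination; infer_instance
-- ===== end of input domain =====

-- B replaces A's build-the-run-list-then-compare by a two-pointer matcher that
-- consumes the string against expected_groups and early-exits (alternative; same cost).

-- ===== PORT A =====
-- the for-loop of A, carrying (groups, count); the trailing `if count > 0` flush is the [] case
def pvLoopA (gs : List Int) (cnt : Int) : List Char → List Int
  | [] => if cnt > 0 then gs ++ [cnt] else gs
  | c :: t =>
    if c = '#' then pvLoopA gs (cnt + 1) t
    else if cnt > 0 then pvLoopA (gs ++ [cnt]) 0 t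
    else pvLoopA gs cnt t

def valid_combination (combination : String) (expected_groups : List Int) : Bool :=
  pvLoopA [] 0 combination.toList == expected_groups

-- ===== PORT B =====
-- `while i < n and combination[i] != '#': i += 1`  — index after skipping non-'#'
def pvSkip (cs : List Char) (i : Nat) : Nat :=
  if h : i < cs.length then
    if cs[i] = '#' then i else pvSkip cs (i + 1)
  else i
termination_by cs.length - i

-- `run = 0; while i < n and combination[i] == '#': run += 1; i += 1`  — run length at i
def pvRun (cs : List Char) (i : Nat) : Nat :=
  if h : i < cs.length then
    if cs[i] = '#' then 1 + pvRun cs (i + 1) else 0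
  else 0
termination_by cs.length - i

-- final `while i < n: if combination[i] == '#': return False; i += 1`
def pvNoHash (cs : List Char) (i : Nat) : Bool :=
  if h : i < cs.length then
    if cs[i] = '#' then false else pvNoHash cs (i + 1)
  else true
termination_by cs.length - i

-- the `for g in expected_groups` loop, carrying the cursor i
def pvLoopB (cs : List Char) (i : Nat) : List Int → Bool
  | [] => pvNoHash cs i
  | g :: gs =>
    let j := pvSkip cs i
    let run := pvRun cs j
    if run = 0 || (run : Int) ≠ g then false
    else pvLoopB cs (j + run) gs

def valid_combination_alt (combination : String) (expected_groups : List Int) : Bool :=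
  pvLoopB combination.toList 0 expected_groups

-- ===== PRECONDITION & SPEC =====
def Spec_valid_combination (combination : String) (expected_groups : List Int) (out : Bool) : Prop := out = valid_combination_alt combination expected_groups
instance (combination : String) (expected_groups : List Int) (out : Bool) : Decidable (Spec_valid_combination combination expected_groups out) := by unfold Spec_valid_combination; infer_instance

-- ===== CLAIM (what is proved, stated in full; the proofs are below) =====
def Claim_equal_valid_combination : Prop := ∀ (combination : String) (expected_groups : List Int), Dom_valid_combination combination expected_groups → Spec_valid_combination combination expected_groups (valid_combination combination expected_groups)

-- ===== LEMMAS AND PROOFS =====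

-- reference: the list of '#'-run lengths of a char list
def runsRef : List Char → List Int
  | [] => []
  | c :: t =>
    if c = '#' then
      (1 + ((t.takeWhile (fun d => d == '#')).length : Int)) :: runsRef (t.dropWhile (fun d => d == '#'))
    else runsRef t
termination_by l => l.length
decreasing_by
  · simpa using Nat.lt_succ_of_le (List.length_dropWhile_le _ t)
  · simp

theorem runsRef_nil : runsRef [] = [] := by rw [runsRef.eq_def]

theorem runsRef_cons_hash (t : List Char) :
    runsRef ('#' :: t) =
      (1 + ((t.takeWhile (fun d => d == '#')).length : Int)) :: runsRef (t.dropWhile (fun d => d == '#')) := by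
  rw [runsRef.eq_def]; simp

theorem runsRef_cons_ne (c : Char) (t : List Char) (hc : c ≠ '#') :
    runsRef (c :: t) = runsRef t := by
  rw [runsRef.eq_def]; simp [hc]

-- ---------- A-side: the accumulator loop computes runsRef with a pending count ----------
def pvPend (cnt : Int) (t : List Char) : List Int :=
  if cnt > 0 then
    (cnt + ((t.takeWhile (fun d => d == '#')).length : Int)) :: runsRef (t.dropWhile (fun d => d == '#'))
  else runsRef t

theorem pvLoopA_eq_pend : ∀ (n : ℕ) (t : List Char), t.length = n →
    ∀ (gs : List Int) (cnt : Int), 0 ≤ cnt → pvLoopA gs cnt t = gs ++ pvPend cnt t := by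
  intro n
  induction n using Nat.strong_induction_on with
  | _ n ih =>
    intro t ht gs cnt hcnt
    match t, ht with
    | [], _ =>
      rw [pvLoopA, pvPend]
      split_ifs with h
      · simp [runsRef_nil]
      · simp [runsRef_nil]
    | c :: t', ht =>
      simp only [List.length_cons] at ht
      by_cases hch : c = '#'
      · subst hch
        rw [pvLoopA, if_pos rfl,
            ih t'.length (by omega) t' rfl gs (cnt + 1) (by omega)]
        congr 1
        simp only [pvPend]
        rw [if_pos (by omega : cnt + 1 > 0)]
        by_cases h0 : cnt > 0
        · rw [if_pos h0]
          simp only [List.takeWhile_cons, List.dropWhile_cons, beq_self_eq_true, if_true,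
            List.length_cons]
          congr 1
          push_cast; ring
        · have hcz : cnt = 0 := by omega
          subst hcz
          rw [if_neg h0, runsRef_cons_hash]
          norm_num
      · have htw : (c :: t').takeWhile (fun d => d == '#') = [] := by simp [hch]
        have hdw : (c :: t').dropWhile (fun d => d == '#') = c :: t' := by simp [hch]
        rw [pvLoopA, if_neg hch]
        by_cases h0 : cnt > 0
        · rw [if_pos h0, ih t'.length (by omega) t' rfl (gs ++ [cnt]) 0 le_rfl]
          simp only [pvPend]
          rw [if_neg (by omega : ¬ (0:Int) > 0), if_pos h0, htw, hdw,
              runsRef_cons_ne c t' hch]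
          simp
        · rw [if_neg h0, ih t'.length (by omega) t' rfl gs cnt hcnt]
          simp only [pvPend]
          rw [if_neg h0, if_neg h0, runsRef_cons_ne c t' hch]

theorem valid_combination_eq_runsRef (combination : String) (expected_groups : List Int) :
    valid_combination combination expected_groups
      = (runsRef combination.toList == expected_groups) := by
  unfold valid_combination
  rw [pvLoopA_eq_pend combination.toList.length combination.toList rfl [] 0 le_rfl]
  simp only [pvPend]
  rw [if_neg (by omega : ¬ (0:Int) > 0)]
  simp

-- ---------- B-side: the matcher decides runsRef (cs.drop i) == gs ----------
theorem pvNoHash_spec : ∀ (n : ℕ) (cs : List Char) (i : Nat), cs.length - i = n →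
    pvNoHash cs i = (runsRef (cs.drop i) == []) := by
  intro n
  induction n using Nat.strong_induction_on with
  | _ n ih =>
    intro cs i hn
    rw [pvNoHash]
    by_cases h : i < cs.length
    · rw [dif_pos h, List.drop_eq_getElem_cons h]
      by_cases hc : cs[i] = '#'
      · rw [if_pos hc, hc, runsRef_cons_hash]
        simp
      · rw [if_neg hc, runsRef_cons_ne _ _ hc]
        exact ih (cs.length - (i+1)) (by omega) cs (i+1) rfl
    · rw [dif_neg h, List.drop_eq_nil_of_le (by omega), runsRef_nil]
      simp

theorem pvSkip_spec : ∀ (n : ℕ) (cs : List Char) (i : Nat), cs.length - i = n →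
    runsRef (cs.drop (pvSkip cs i)) = runsRef (cs.drop i) ∧
    (∀ h : pvSkip cs i < cs.length, cs[pvSkip cs i] = '#') := by
  intro n
  induction n using Nat.strong_induction_on with
  | _ n ih =>
    intro cs i hn
    rw [pvSkip]
    by_cases h : i < cs.length
    · rw [dif_pos h]
      by_cases hc : cs[i] = '#'
      · rw [if_pos hc]
        exact ⟨rfl, fun _ => hc⟩
      · rw [if_neg hc]
        obtain ⟨h3, h4⟩ := ih (cs.length - (i+1)) (by omega) cs (i+1) rfl
        refine ⟨?_, h4⟩
        rw [h3, List.drop_eq_getElem_cons h, runsRef_cons_ne _ _ hc]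
    · rw [dif_neg h]
      exact ⟨rfl, fun hlt => absurd hlt h⟩

theorem pvRun_spec : ∀ (n : ℕ) (cs : List Char) (i : Nat), cs.length - i = n →
    pvRun cs i = ((cs.drop i).takeWhile (fun d => d == '#')).length ∧
    cs.drop (i + pvRun cs i) = (cs.drop i).dropWhile (fun d => d == '#') := by
  intro n
  induction n using Nat.strong_induction_on with
  | _ n ih =>
    intro cs i hn
    rw [pvRun]
    by_cases h : i < cs.length
    · rw [dif_pos h]
      have hd := List.drop_eq_getElem_cons h
      by_cases hc : cs[i] = '#'
      · rw [if_pos hc]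
        obtain ⟨h1, h2⟩ := ih (cs.length - (i+1)) (by omega) cs (i+1) rfl
        have e : List.takeWhile (fun d => d == '#') (cs.drop i)
            = cs[i] :: List.takeWhile (fun d => d == '#') (cs.drop (i+1)) := by
          rw [hd, List.takeWhile_cons]; simp [hc]
        constructor
        · rw [e, List.length_cons, h1]; omega
        · rw [show i + (1 + pvRun cs (i+1)) = (i+1) + pvRun cs (i+1) by omega, h2,
              hd, List.dropWhile_cons, hc]
          simp
      · rw [if_neg hc]
        constructor
        · rw [hd, List.takeWhile_cons]
          simp [hc]
        · rw [Nat.add_zero, hd, List.dropWhile_cons]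
          simp [hc]
    · rw [dif_neg h]
      have hnil : cs.drop i = [] := List.drop_eq_nil_of_le (by omega)
      constructor
      · simp [hnil]
      · rw [Nat.add_zero, hnil]; simp

theorem pvLoopB_spec : ∀ (gs : List Int) (cs : List Char) (i : Nat),
    pvLoopB cs i gs = (runsRef (cs.drop i) == gs) := by
  intro gs
  induction gs with
  | nil =>
    intro cs i
    exact pvNoHash_spec (cs.length - i) cs i rfl
  | cons g gs ihg =>
    intro cs i
    rw [pvLoopB]
    obtain ⟨hs3, hs4⟩ := pvSkip_spec (cs.length - i) cs i rfl
    set j := pvSkip cs i with hj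
    rw [← hs3]
    by_cases hlt : j < cs.length
    · have hhash := hs4 hlt
      have hdropj : cs.drop j = cs[j] :: cs.drop (j+1) := List.drop_eq_getElem_cons hlt
      have hrun_pos : pvRun cs j = 1 + pvRun cs (j+1) := by
        rw [pvRun, dif_pos hlt, if_pos hhash]
      have hruns : runsRef (cs.drop j)
          = ((pvRun cs j : Int)) :: runsRef (cs.drop (j + pvRun cs j)) := by
        obtain ⟨hr1', hr2'⟩ := pvRun_spec (cs.length - (j+1)) cs (j+1) rfl
        rw [hdropj, hhash, runsRef_cons_hash, hrun_pos]
        congr 1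
        · rw [hr1']; push_cast; ring
        · rw [show j + (1 + pvRun cs (j+1)) = (j+1) + pvRun cs (j+1) by omega, hr2']
      rw [hruns]
      by_cases hz : pvRun cs j = 0
      · omega
      · by_cases hg : (pvRun cs j : Int) = g
        · rw [if_neg (by simp [hz, hg]), ihg, hg]
          simp
        · rw [if_pos (by simp [hg])]
          simp [hg]
    · have hnil : cs.drop j = [] := List.drop_eq_nil_of_le (by omega)
      have hz : pvRun cs j = 0 := by rw [pvRun, dif_neg hlt]
      rw [if_pos (by simp [hz]), hnil, runsRef_nil]
      simp

-- ===== VERDICT (by name: the statement is the Claim_ definition above) =====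
theorem valid_combination_spec : Claim_equal_valid_combination := by
  intro combination expected_groups _
  unfold Spec_valid_combination valid_combination_alt
  rw [valid_combination_eq_runsRef, pvLoopB_spec]
  rfl
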